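-- pv_equiv track=rewrite | github.com/joshanashakya/dissertation | workspace/dataset/java-python/GeeksForGeeks/701/A/2.py | getTrailingZeroes
-- ===== SOURCE A (Python) =====
-- def getTrailingZeroes(n):
--
--     count = 0
--     val, powerTwo = 1, 2
--
--     # Implementation of the Legendre's
--     # formula
--     while (val != 0):
--         val = n //powerTwo
--         count += val
--         powerTwo *= 2
--
--     # Count has the highest power of 2
--     # that divides n! in base 10
--     return (count // 4)
-- ===== SOURCE B (Python) =====
-- def getTrailingZeroes(n):
--     # exponent of 2 in n! is n - popcount(n) (Legendre closed form)
--     return (n - n.bit_count()) // 4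
-- ===== Notes on version B (the rewrite author's own statement) =====
-- stated objective: simpler
-- what changed: Replaced the iterative Legendre summation loop with the closed form (n - popcount(n)) // 4, using the identity that the exponent of 2 in n! equals n minus the number of 1-bits of n.
import Mathlib
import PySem

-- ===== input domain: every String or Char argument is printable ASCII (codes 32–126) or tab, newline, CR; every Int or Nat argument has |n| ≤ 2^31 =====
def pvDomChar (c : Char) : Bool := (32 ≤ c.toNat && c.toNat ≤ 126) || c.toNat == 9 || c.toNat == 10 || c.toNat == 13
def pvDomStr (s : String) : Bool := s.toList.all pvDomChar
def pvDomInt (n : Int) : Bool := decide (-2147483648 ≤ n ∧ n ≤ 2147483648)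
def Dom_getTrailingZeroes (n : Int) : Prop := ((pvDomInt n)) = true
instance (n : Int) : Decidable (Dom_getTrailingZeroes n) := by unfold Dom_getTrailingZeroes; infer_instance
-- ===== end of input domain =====

-- B replaces A's Legendre summation loop by the closed form (n - popcount n) // 4: simpler, no loop.

-- ===== PORT A =====
-- while (val != 0): val = n // powerTwo; count += val; powerTwo *= 2
-- fuel only makes the loop total; for 0 ≤ n the loop terminates within n.toNat + 2 steps (A diverges for n < 0).
def loopA (n : Int) (count val powerTwo : Int) : Nat → Int
  | 0 => count
  | fuel + 1 =>
    if val ≠ 0 then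
      loopA n (count + PySem.Int.floordiv n powerTwo) (PySem.Int.floordiv n powerTwo) (powerTwo * 2) fuel
    else count

def getTrailingZeroes (n : Int) : Int :=
  PySem.Int.floordiv (loopA n 0 1 2 (n.toNat + 2)) 4

-- ===== PORT B =====
def getTrailingZeroes_alt (n : Int) : Int :=
  PySem.Int.floordiv (n - PySem.Int.bitCount n) 4

-- ===== PRECONDITION & SPEC =====
-- A's while-loop never terminates for n < 0 (val stays at -1), so only 0 ≤ n is admitted.
def Pre_getTrailingZeroes (n : Int) : Prop := 0 ≤ n
instance (n : Int) : Decidable (Pre_getTrailingZeroes n) := by unfold Pre_getTrailingZeroes; infer_instance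
def pvWitness_getTrailingZeroes : Int := (6)
def Spec_getTrailingZeroes (n : Int) (out : Int) : Prop := out = getTrailingZeroes_alt n
instance (n : Int) (out : Int) : Decidable (Spec_getTrailingZeroes n out) := by unfold Spec_getTrailingZeroes; infer_instance

-- ===== CLAIM =====
def Claim_equal_getTrailingZeroes : Prop :=
  ∀ (n : Int), Dom_getTrailingZeroes n → Pre_getTrailingZeroes n →
    Spec_getTrailingZeroes n (getTrailingZeroes n)

-- ===== LEMMAS AND PROOFS =====

theorem loopA_val_zero (n count powerTwo : Int) (fuel : Nat) :
    loopA n count 0 powerTwo fuel = count := by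
  cases fuel <;> simp [loopA]

theorem loopA_succ (n count val p : Int) (f : Nat) :
    loopA n count val p (f + 1) =
      if val ≠ 0 then
        loopA n (count + PySem.Int.floordiv n p) (PySem.Int.floordiv n p) (p * 2) f
      else count := rfl

-- doubling the divisor = halving the dividend (for a natural dividend and positive divisor)
theorem loopA_shift (fuel : Nat) :
    ∀ (p : Int), 0 < p → ∀ (m : Nat) (count val : Int),
      loopA (m : Int) count val (2 * p) fuel = loopA ((m / 2 : Nat) : Int) count val p fuel := by
  induction fuel with
  | zero => intro p hp m count val; simp [loopA]
  | succ fuel ih =>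
    intro p hp m count val
    by_cases hv : val = 0
    · simp [loopA_succ, hv]
    · obtain ⟨q, rfl⟩ : ∃ q : Nat, p = (q : Int) := ⟨p.toNat, (Int.toNat_of_nonneg hp.le).symm⟩
      have hq : PySem.Int.floordiv (m : Int) (2 * (q : Int)) = PySem.Int.floordiv ((m / 2 : Nat) : Int) (q : Int) := by
        rw [show (2 : Int) * (q : Int) = ((2 * q : Nat) : Int) by push_cast; ring,
            PySem.Int.floordiv_natCast, PySem.Int.floordiv_natCast,
            Nat.div_div_eq_div_mul]
      rw [loopA_succ, loopA_succ, if_pos hv, if_pos hv, hq]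
      rw [show (2 : Int) * (q : Int) * 2 = 2 * ((q : Int) * 2) by ring]
      exact ih ((q : Int) * 2) (by omega) m _ _

theorem pop_rec (m : Nat) (hm : 0 < m) :
    PySem.Int.bitCount (m : Int) = m % 2 + PySem.Int.bitCount ((m / 2 : Nat) : Int) :=
  PySem.Int.bitCount_natCast hm

theorem bitCount_le (m : Nat) : PySem.Int.bitCount (m : Int) ≤ m := by
  induction m using Nat.strong_induction_on with
  | _ m ih =>
    rcases Nat.eq_zero_or_pos m with h | h
    · simp [h, PySem.Int.bitCount_zero]
    · rw [pop_rec m h]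
      have := ih (m / 2) (Nat.div_lt_self h (by omega))
      omega

-- main loop invariant: with enough fuel and a nonzero entry value, the loop adds m - popcount m
theorem loopA_main : ∀ (fuel : Nat) (m : Nat), m ≤ fuel → ∀ (count val : Int), val ≠ 0 →
    loopA (m : Int) count val 2 (fuel + 1) = count + m - PySem.Int.bitCount (m : Int) := by
  intro fuel
  induction fuel with
  | zero =>
    intro m hm count val hv
    interval_cases m
    simp [loopA_succ, hv, loopA_val_zero, PySem.Int.bitCount_zero, PySem.Int.floordiv]
  | succ fuel ih =>
    intro m hm count val hv
    have hq : PySem.Int.floordiv (m : Int) 2 = ((m / 2 : Nat) : Int) := by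
      rw [PySem.Int.floordiv_eq_ediv_of_pos (show (0:Int) < 2 by omega)]; omega
    rw [loopA_succ, if_pos hv, hq,
        show (2 : Int) * 2 = 2 * 2 by ring, loopA_shift (fuel + 1) 2 (by omega) m]
    rcases Nat.eq_zero_or_pos (m / 2) with h0 | h0
    · rw [h0]
      rw [show ((0 : Nat) : Int) = 0 by rfl, loopA_val_zero]
      rcases Nat.eq_zero_or_pos m with hz | hz
      · simp [hz, PySem.Int.bitCount_zero]
      · have hm1 : m = 1 := by omega
        subst hm1
        have h1 : PySem.Int.bitCount ((1 : Nat) : Int) = 1 := by decide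
        rw [h1]; push_cast; ring
    · have := ih (m / 2) (by omega) (count + ((m / 2 : Nat) : Int)) ((m / 2 : Nat) : Int)
        (by exact_mod_cast Nat.pos_iff_ne_zero.mp h0 ∘ fun h => by exact_mod_cast h)
      rw [this, pop_rec m (by omega)]
      have hle := bitCount_le (m / 2)
      have hmod := Nat.div_add_mod m 2
      push_cast
      omega

-- ===== VERDICT =====
theorem getTrailingZeroes_spec : Claim_equal_getTrailingZeroes := by
  intro n _ hpre
  unfold Spec_getTrailingZeroes getTrailingZeroes getTrailingZeroes_alt
  have hn : ((n.toNat : Nat) : Int) = n := Int.toNat_of_nonneg hpre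
  have := loopA_main (n.toNat + 1) n.toNat (by omega) 0 1 (by omega)
  rw [hn] at this
  rw [show n.toNat + 2 = (n.toNat + 1) + 1 by omega, this]
  ring_nf
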